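-- pv_equiv track=rewrite | github.com/BoredProjects/2D-Field-Navigation | 2DField.py | clearOld
-- ===== SOURCE A (Python) =====
-- def clearOld(new,old):
--     for i in range(len(new)-1,-1,-1):
--         if new[i] == -1:
--             new.clear()
--             new.append(-1)
--             return new
--         elif new[i] in old:
--             new.pop(i)
--
--
--     return new
-- ===== SOURCE B (Python) =====
-- def clearOld(new, old):
--     # Two phases: a -1 guard, then one forward in-place filter (same mutation of `new` as A).
--     if -1 in new:
--         new.clear()
--         new.append(-1)
--         return new
--     new[:] = [x for x in new if x not in old]
--     return new
-- ===== Notes on version B (the rewrite author's own statement) =====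
-- stated objective: simpler
-- what changed: Replaced the backward index/pop loop (with early return inside it) by a two-phase version: a -1 membership guard up front, then a single forward in-place filter via slice assignment; same list object is mutated.
import Mathlib
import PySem

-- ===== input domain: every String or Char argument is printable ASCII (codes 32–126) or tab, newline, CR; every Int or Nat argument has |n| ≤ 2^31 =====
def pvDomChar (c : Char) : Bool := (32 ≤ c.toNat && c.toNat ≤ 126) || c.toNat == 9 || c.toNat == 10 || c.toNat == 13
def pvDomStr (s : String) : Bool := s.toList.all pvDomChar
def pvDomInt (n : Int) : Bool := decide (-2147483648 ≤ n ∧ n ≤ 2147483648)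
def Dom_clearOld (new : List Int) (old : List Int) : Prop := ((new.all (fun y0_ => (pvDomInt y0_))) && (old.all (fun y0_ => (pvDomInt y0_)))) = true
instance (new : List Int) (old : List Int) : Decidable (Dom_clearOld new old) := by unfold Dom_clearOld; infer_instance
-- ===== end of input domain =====

-- B replaces A's backward index/pop loop by a -1 membership guard plus one forward filter (simpler);
-- both mutate `new` in place in Python, and the final contents coincide with the return value proved here.


-- ===== PORT A =====
-- the for-loop over range(len(new)-1,-1,-1); indices always stay in range, so the
-- `none` branches of pyGet?/pop? (Python would raise) are unreachable and return the state unchanged.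
def clearOldLoop (old : List Int) (is : List Int) (new : List Int) : List Int :=
  match is with
  | [] => new
  | i :: rest =>
    match PySem.List.pyGet? new i with
    | none => new
    | some v =>
      if v = -1 then [-1]
      else if old.contains v then
        match PySem.List.pop? new i with
        | none => new
        | some (_, new') => clearOldLoop old rest new'
      else clearOldLoop old rest new

def clearOld (new : List Int) (old : List Int) : List Int :=
  clearOldLoop old (PySem.List.pyRange ((new.length : Int) - 1) (-1) (-1)) new

-- ===== PORT B =====
def clearOld_alt (new : List Int) (old : List Int) : List Int :=
  if new.contains (-1) then [-1]
  else new.filter (fun x => !(old.contains x))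

-- ===== PRECONDITION & SPEC =====
def Spec_clearOld (new : List Int) (old : List Int) (out : List Int) : Prop := out = clearOld_alt new old
instance (new : List Int) (old : List Int) (out : List Int) : Decidable (Spec_clearOld new old out) := by unfold Spec_clearOld; infer_instance

-- ===== CLAIM (what is proved, stated in full; the proofs are below) =====
def Claim_equal_clearOld : Prop := ∀ (new : List Int) (old : List Int), Dom_clearOld new old → Spec_clearOld new old (clearOld new old)

-- ===== LEMMAS AND PROOFS =====

-- Invariant of A's backward loop: with `pre` still to be scanned and `suf` the already-processed
-- tail, the loop returns [-1] if -1 occurs in `pre`, else the filtered `pre` followed by `suf`.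
theorem clearOldLoop_invariant (old : List Int) (pre suf : List Int) :
    clearOldLoop old (PySem.List.pyRange ((pre.length : Int) - 1) (-1) (-1)) (pre ++ suf)
      = if pre.contains (-1) then [-1]
        else pre.filter (fun x => !(old.contains x)) ++ suf := by
  induction pre using List.reverseRecOn generalizing suf with
  | nil =>
      simp [PySem.List.pyRange_neg_one_eq_nil, clearOldLoop]
  | append_singleton ys x ih =>
      have hlen : ((ys ++ [x]).length : Int) - 1 = (ys.length : Int) := by
        simp
      rw [hlen, PySem.List.pyRange_neg_one_cons (by omega)]
      have hlist : (ys ++ [x]) ++ suf = ys ++ (x :: suf) := by simp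
      have hget : PySem.List.pyGet? ((ys ++ [x]) ++ suf) (ys.length : Int) = some x := by
        rw [hlist, PySem.List.pyGet?_natCast]
        simp
      rw [clearOldLoop, hget]
      dsimp only
      by_cases hx1 : x = -1
      · simp [hx1]
      · rw [if_neg hx1]
        have hxne : ¬ ((-1 : Int) = x) := fun h => hx1 h.symm
        by_cases hmem : x ∈ old
        · have hpop : PySem.List.pop? ((ys ++ [x]) ++ suf) (ys.length : Int)
              = some (x, ys ++ suf) := by
            have hlt : ys.length < ((ys ++ [x]) ++ suf).length := by simp
            rw [PySem.List.pop?_natCast _ _ hlt]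
            simp [List.eraseIdx_append_of_length_le (Nat.le_refl ys.length)]
          have hc : old.contains x = true := by simpa using hmem
          rw [hc, if_pos rfl, hpop]
          dsimp only
          rw [ih suf]
          simp [List.filter_append, hmem, hxne]
        · have hc : old.contains x = false := by simpa using hmem
          rw [hc]
          simp only [Bool.false_eq_true, if_false]
          rw [hlist, ih (x :: suf)]
          simp [List.filter_append, hmem, hxne]

-- ===== VERDICT (by name: the statement is the Claim_ definition above) =====
theorem clearOld_spec : Claim_equal_clearOld := by
  intro new old _
  unfold Spec_clearOld clearOld clearOld_alt
  have h := clearOldLoop_invariant old new []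
  simp only [List.append_nil] at h
  rw [h]
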